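-- pv_equiv track=rewrite | github.com/JH-TT/Coding_Practice | BaekJoon/Back_Tracking/1799.py | dfs
-- ===== SOURCE A (Python) =====
-- def dfs(pos, bishops, level, right, left) -> int:
--     cnt = len(bishops)
--     for lvl in range(level + 1, len(pos)):
--         p = pos[lvl]
--
--         r = p[0] + p[1]
--         l = p[0] - p[1]
--
--         if r in right or l in left:
--             continue
--
--         # 비숍을 놓을 수 있다면 다음단계...
--         bishops.append(p)
--         right.add(r)
--         left.add(l)
--         cnt = max(cnt, dfs(pos, bishops, lvl, right, left))
--         bishops.pop()
--         right.remove(r)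
--         left.remove(l)
--
--     return cnt
-- ===== SOURCE B (Python) =====
-- def dfs(pos, bishops, level, right, left) -> int:
--     # Bishops on cells of even (x+y) never share a diagonal with cells of odd (x+y),
--     # so solve the two colour classes independently and add the counts.
--     def best(cells, right, left):
--         if not cells:
--             return 0
--         (x, y), rest = cells[0], cells[1:]
--         r, l = x + y, x - y
--         skip = best(rest, right, left)
--         if r in right or l in left:
--             return skip
--         return max(skip, 1 + best(rest, right | {r}, left | {l}))
--
--     cells = pos[level + 1:]
--     evens = [c for c in cells if (c[0] + c[1]) % 2 == 0]
--     odds = [c for c in cells if (c[0] + c[1]) % 2 != 0]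
--     return len(bishops) + best(evens, set(right), set(left)) + best(odds, set(right), set(left))
-- ===== Notes on version B (the rewrite author's own statement) =====
-- stated objective: alternative
-- what changed: Instead of one backtracking search over all remaining cells, B splits the cells into the two diagonal colour classes (parity of x+y, which never share a diagonal), solves each class with an independent immutable choose/skip recursion, and sums the two counts.
-- outside the precondition, e.g. on dfs([(0, 0), (1, 0)], [], -2, set(), set()): A returns 2, B returns 1
import Mathlib
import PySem

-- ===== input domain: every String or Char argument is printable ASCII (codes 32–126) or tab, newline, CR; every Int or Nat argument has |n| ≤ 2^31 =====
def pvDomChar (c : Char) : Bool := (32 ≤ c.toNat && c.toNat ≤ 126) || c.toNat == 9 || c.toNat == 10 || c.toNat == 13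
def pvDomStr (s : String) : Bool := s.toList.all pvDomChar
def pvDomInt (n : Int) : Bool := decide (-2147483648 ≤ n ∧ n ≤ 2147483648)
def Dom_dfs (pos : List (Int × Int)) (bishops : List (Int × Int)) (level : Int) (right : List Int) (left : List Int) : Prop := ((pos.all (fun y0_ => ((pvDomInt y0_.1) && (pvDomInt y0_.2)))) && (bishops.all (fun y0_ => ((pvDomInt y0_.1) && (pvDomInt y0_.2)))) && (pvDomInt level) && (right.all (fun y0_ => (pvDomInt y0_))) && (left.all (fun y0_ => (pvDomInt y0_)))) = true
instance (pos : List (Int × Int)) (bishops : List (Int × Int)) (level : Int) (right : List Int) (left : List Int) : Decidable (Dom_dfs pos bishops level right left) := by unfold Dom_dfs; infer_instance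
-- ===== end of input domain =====

-- B replaces A's single backtracking over all remaining cells by two independent
-- backtrackings over the even and odd diagonal colour classes, summed (alternative
-- algorithm, same measured cost). A mutates bishops/right/left but restores them
-- before returning; the equivalence proved here is about the return value only.

-- ===== PORT A =====
-- A's loop mutates bishops/right/left around each recursive call and restores them
-- (append/pop, add/remove with r,l fresh), so the port passes the extended
-- structures only into the recursive call; the loop state that survives is cnt.
-- fuel is a totality guard only: it starts at (len(pos) - level).toNat, enough for
-- the recursion depth (each recursive call strictly increases level).
def dfsF (fuel : Nat) (pos : List (Int × Int)) (bishops : List (Int × Int)) (level : Int) (right : List Int) (left : List Int) : Int :=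
  match fuel with
  | 0 => bishops.length
  | f + 1 =>
    (PySem.List.pyRange (level + 1) (pos.length : Int) 1).foldl
      (fun cnt lvl =>
        match PySem.List.pyGet? pos lvl with
        | none => cnt   -- IndexError in Python; excluded by Pre_dfs
        | some p =>
          let r := p.1 + p.2
          let l := p.1 - p.2
          if r ∈ right ∨ l ∈ left then cnt
          else max cnt (dfsF f pos (bishops ++ [p]) lvl (PySem.Set.add right r) (PySem.Set.add left l)))
      bishops.length

def dfs (pos : List (Int × Int)) (bishops : List (Int × Int)) (level : Int) (right : List Int) (left : List Int) : Int :=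
  dfsF ((pos.length : Int) - level).toNat pos bishops level right left

-- ===== PORT B =====
-- choose/skip recursion of Source B's 'best' over one colour class, immutable sets
def dfsBest (cells : List (Int × Int)) (right : List Int) (left : List Int) : Int :=
  match cells with
  | [] => 0
  | c :: rest =>
    let r := c.1 + c.2
    let l := c.1 - c.2
    let skip := dfsBest rest right left
    if r ∈ right ∨ l ∈ left then skip
    else max skip (1 + dfsBest rest (PySem.Set.union right [r]) (PySem.Set.union left [l]))

def dfs_alt (pos : List (Int × Int)) (bishops : List (Int × Int)) (level : Int) (right : List Int) (left : List Int) : Int :=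
  let cells := PySem.List.slice pos (some (level + 1)) none
  let evens := cells.filter (fun c => PySem.Int.mod (c.1 + c.2) 2 == 0)
  let odds := cells.filter (fun c => PySem.Int.mod (c.1 + c.2) 2 != 0)
  (bishops.length : Int) + dfsBest evens (PySem.Set.ofList right) (PySem.Set.ofList left)
    + dfsBest odds (PySem.Set.ofList right) (PySem.Set.ofList left)

-- ===== PRECONDITION & SPEC =====
-- Pre_ excludes level < -1 (never produced by the intended initial call, level = -1,
-- nor by the recursion): there A either raises IndexError (level+1 < -len(pos)) or,
-- by Python negative-index wraparound, scans a suffix of pos twice before scanning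
-- pos itself — an artefact of range()+negative indexing on an internal helper.
def Pre_dfs (pos : List (Int × Int)) (bishops : List (Int × Int)) (level : Int) (right : List Int) (left : List Int) : Prop := -1 ≤ level
instance (pos : List (Int × Int)) (bishops : List (Int × Int)) (level : Int) (right : List Int) (left : List Int) : Decidable (Pre_dfs pos bishops level right left) := by unfold Pre_dfs; infer_instance

def pvWitness_dfs : (List (Int × Int)) × (List (Int × Int)) × Int × List Int × List Int :=
  ([((0 : Int), (0 : Int)), (1, 2)], [], -1, [], [])

def Spec_dfs (pos : List (Int × Int)) (bishops : List (Int × Int)) (level : Int) (right : List Int) (left : List Int) (out : Int) : Prop := out = dfs_alt pos bishops level right left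
instance (pos : List (Int × Int)) (bishops : List (Int × Int)) (level : Int) (right : List Int) (left : List Int) (out : Int) : Decidable (Spec_dfs pos bishops level right left out) := by unfold Spec_dfs; infer_instance

-- ===== CLAIM (what is proved, stated in full; the proofs are below) =====
def Claim_equal_dfs : Prop := ∀ (pos : List (Int × Int)) (bishops : List (Int × Int)) (level : Int) (right : List Int) (left : List Int), Dom_dfs pos bishops level right left → Pre_dfs pos bishops level right left → Spec_dfs pos bishops level right left (dfs pos bishops level right left)

-- ===== LEMMAS AND PROOFS =====

theorem dfsBest_nonneg (cells : List (Int × Int)) (R L : List Int) : 0 ≤ dfsBest cells R L := by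
  induction cells generalizing R L with
  | nil => simp [dfsBest]
  | cons c rest ih =>
    simp only [dfsBest]
    split
    · exact ih R L
    · exact le_max_of_le_left (ih R L)

theorem union_singleton (s : List Int) (x : Int) : PySem.Set.union s [x] = PySem.Set.add s x := rfl

-- dfsBest depends on the two sets only through membership of the cells' diagonals
theorem dfsBest_congr (cells : List (Int × Int)) (R L R' L' : List Int)
    (h : ∀ c ∈ cells, ((c.1 + c.2 ∈ R) ↔ (c.1 + c.2 ∈ R')) ∧ ((c.1 - c.2 ∈ L) ↔ (c.1 - c.2 ∈ L'))) :
    dfsBest cells R L = dfsBest cells R' L' := by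
  induction cells generalizing R L R' L' with
  | nil => rfl
  | cons c rest ih =>
    have hc := h c (List.mem_cons_self)
    have htail : ∀ c' ∈ rest, ((c'.1 + c'.2 ∈ R) ↔ (c'.1 + c'.2 ∈ R')) ∧ ((c'.1 - c'.2 ∈ L) ↔ (c'.1 - c'.2 ∈ L')) :=
      fun c' hm => h c' (List.mem_cons_of_mem _ hm)
    simp only [dfsBest, union_singleton]
    have hcond : (c.1 + c.2 ∈ R ∨ c.1 - c.2 ∈ L) ↔ (c.1 + c.2 ∈ R' ∨ c.1 - c.2 ∈ L') := by
      rw [hc.1, hc.2]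
    by_cases hx : c.1 + c.2 ∈ R ∨ c.1 - c.2 ∈ L
    · rw [if_pos hx, if_pos (hcond.mp hx)]
      exact ih R L R' L' htail
    · rw [if_neg hx, if_neg (fun hy => hx (hcond.mpr hy))]
      have h1 : dfsBest rest R L = dfsBest rest R' L' := ih R L R' L' htail
      have h2 : dfsBest rest (PySem.Set.add R (c.1 + c.2)) (PySem.Set.add L (c.1 - c.2))
          = dfsBest rest (PySem.Set.add R' (c.1 + c.2)) (PySem.Set.add L' (c.1 - c.2)) := by
        refine ih _ _ _ _ (fun c' hm => ?_)
        have ht := htail c' hm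
        constructor
        · simp only [PySem.Set.mem_add]; rw [ht.1]
        · simp only [PySem.Set.mem_add]; rw [ht.2]
      rw [h1, h2]

-- adding diagonals of one parity never changes the count over cells of the other parity
theorem dfsBest_add_irrel (cells : List (Int × Int)) (R L : List Int) (r l : Int)
    (hrl : (r % 2 = l % 2))
    (hcells : ∀ c ∈ cells, (c.1 + c.2) % 2 ≠ r % 2) :
    dfsBest cells (PySem.Set.add R r) (PySem.Set.add L l) = dfsBest cells R L := by
  refine dfsBest_congr _ _ _ _ _ (fun c hm => ?_)
  have hp := hcells c hm
  constructor
  · simp only [PySem.Set.mem_add]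
    constructor
    · rintro (h | h)
      · exact h
      · exfalso; exact hp (by rw [h])
    · exact Or.inl
  · simp only [PySem.Set.mem_add]
    constructor
    · rintro (h | h)
      · exact h
      · exfalso
        apply hp
        have : (c.1 - c.2) % 2 = (c.1 + c.2) % 2 := by omega
        omega
    · exact Or.inl

theorem mod_two_eq_emod (x : Int) : PySem.Int.mod x 2 = x % 2 :=
  PySem.Int.mod_eq_emod_of_pos (by omega)

-- the heart of B: the two colour classes are independent
theorem dfsBest_split (cells : List (Int × Int)) (R L : List Int) :
    dfsBest cells R L
      = dfsBest (cells.filter (fun c => PySem.Int.mod (c.1 + c.2) 2 == 0)) R L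
        + dfsBest (cells.filter (fun c => PySem.Int.mod (c.1 + c.2) 2 != 0)) R L := by
  induction cells generalizing R L with
  | nil => simp [dfsBest]
  | cons c rest ih =>
    have hparE : ∀ c' ∈ rest.filter (fun c => PySem.Int.mod (c.1 + c.2) 2 == 0), (c'.1 + c'.2) % 2 = 0 := by
      intro c' hm
      have := List.of_mem_filter hm
      simpa [mod_two_eq_emod] using this
    have hparO : ∀ c' ∈ rest.filter (fun c => PySem.Int.mod (c.1 + c.2) 2 != 0), (c'.1 + c'.2) % 2 = 1 := by
      intro c' hm
      have := List.of_mem_filter hm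
      simp [mod_two_eq_emod] at this
      omega
    by_cases he : (c.1 + c.2) % 2 = 0
    · have hfE : (c :: rest).filter (fun c => PySem.Int.mod (c.1 + c.2) 2 == 0)
          = c :: rest.filter (fun c => PySem.Int.mod (c.1 + c.2) 2 == 0) := by
        simp [List.filter_cons, mod_two_eq_emod, he]
      have hfO : (c :: rest).filter (fun c => PySem.Int.mod (c.1 + c.2) 2 != 0)
          = rest.filter (fun c => PySem.Int.mod (c.1 + c.2) 2 != 0) := by
        simp [List.filter_cons, mod_two_eq_emod, he]
      rw [hfE, hfO]
      simp only [dfsBest, union_singleton]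
      by_cases hx : c.1 + c.2 ∈ R ∨ c.1 - c.2 ∈ L
      · rw [if_pos hx, if_pos hx]; exact ih R L
      · rw [if_neg hx, if_neg hx]
        have hIrr : dfsBest (rest.filter (fun c => PySem.Int.mod (c.1 + c.2) 2 != 0))
            (PySem.Set.add R (c.1 + c.2)) (PySem.Set.add L (c.1 - c.2))
            = dfsBest (rest.filter (fun c => PySem.Int.mod (c.1 + c.2) 2 != 0)) R L := by
          refine dfsBest_add_irrel _ _ _ _ _ (by omega) (fun c' hm => ?_)
          have := hparO c' hm; omega
        have h1 := ih R L
        have h2 := ih (PySem.Set.add R (c.1 + c.2)) (PySem.Set.add L (c.1 - c.2))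
        rw [h1, h2, hIrr]
        have := dfsBest_nonneg (rest.filter (fun c => PySem.Int.mod (c.1 + c.2) 2 != 0)) R L
        omega
    · have hfE : (c :: rest).filter (fun c => PySem.Int.mod (c.1 + c.2) 2 == 0)
          = rest.filter (fun c => PySem.Int.mod (c.1 + c.2) 2 == 0) := by
        simp [List.filter_cons, mod_two_eq_emod, he]
      have hfO : (c :: rest).filter (fun c => PySem.Int.mod (c.1 + c.2) 2 != 0)
          = c :: rest.filter (fun c => PySem.Int.mod (c.1 + c.2) 2 != 0) := by
        simp [List.filter_cons, mod_two_eq_emod, he]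
      rw [hfE, hfO]
      simp only [dfsBest, union_singleton]
      by_cases hx : c.1 + c.2 ∈ R ∨ c.1 - c.2 ∈ L
      · rw [if_pos hx, if_pos hx]; exact ih R L
      · rw [if_neg hx, if_neg hx]
        have hIrr : dfsBest (rest.filter (fun c => PySem.Int.mod (c.1 + c.2) 2 == 0))
            (PySem.Set.add R (c.1 + c.2)) (PySem.Set.add L (c.1 - c.2))
            = dfsBest (rest.filter (fun c => PySem.Int.mod (c.1 + c.2) 2 == 0)) R L := by
          refine dfsBest_add_irrel _ _ _ _ _ (by omega) (fun c' hm => ?_)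
          have := hparE c' hm; omega
        have h1 := ih R L
        have h2 := ih (PySem.Set.add R (c.1 + c.2)) (PySem.Set.add L (c.1 - c.2))
        rw [h1, h2, hIrr]
        have := dfsBest_nonneg (rest.filter (fun c => PySem.Int.mod (c.1 + c.2) 2 == 0)) R L
        omega

-- A's backtracking equals len(bishops) + best count over the remaining cells
theorem dfsF_eq (f : Nat) : ∀ (pos bishops : List (Int × Int)) (level : Int) (R L : List Int),
    -1 ≤ level → (pos.length : Int) - level ≤ f →
    dfsF f pos bishops level R L = bishops.length + dfsBest (pos.drop (level + 1).toNat) R L := by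
  induction f with
  | zero =>
    intro pos bishops level R L hlev hf
    have : pos.length ≤ (level + 1).toNat := by omega
    rw [List.drop_eq_nil_of_le this]
    simp [dfsF, dfsBest]
  | succ f ih =>
    intro pos bishops level R L hlev hf
    have loop : ∀ (m k : Nat) (acc : Int), pos.length ≤ k + m → (bishops.length : Int) ≤ acc → level < (k : Int) →
        (PySem.List.pyRange (k : Int) (pos.length : Int) 1).foldl
          (fun cnt lvl =>
            match PySem.List.pyGet? pos lvl with
            | none => cnt
            | some p =>
              let r := p.1 + p.2
              let l := p.1 - p.2
              if r ∈ R ∨ l ∈ L then cnt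
              else max cnt (dfsF f pos (bishops ++ [p]) lvl (PySem.Set.add R r) (PySem.Set.add L l)))
          acc
        = max acc ((bishops.length : Int) + dfsBest (pos.drop k) R L) := by
      intro m
      induction m with
      | zero =>
        intro k acc hk hacc hlk
        have hnil : PySem.List.pyRange (k : Int) (pos.length : Int) 1 = [] :=
          PySem.List.pyRange_one_eq_nil (by omega)
        rw [hnil, List.drop_eq_nil_of_le (by omega)]
        simp only [List.foldl_nil, dfsBest]
        omega
      | succ m ihm =>
        intro k acc hk hacc hlk
        by_cases hklen : k < pos.length
        · rw [PySem.List.pyRange_one_cons (by exact_mod_cast hklen)]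
          rw [List.foldl_cons]
          have hget : PySem.List.pyGet? pos (k : Int) = some pos[k] := by
            rw [PySem.List.pyGet?_natCast, List.getElem?_eq_getElem hklen]
          have hdrop : pos.drop k = pos[k] :: pos.drop (k + 1) := List.drop_eq_getElem_cons hklen
          have hcast : (k : Int) + 1 = ((k + 1 : Nat) : Int) := by push_cast; ring
          simp only [hget]
          by_cases hx : pos[k].1 + pos[k].2 ∈ R ∨ pos[k].1 - pos[k].2 ∈ L
          · rw [if_pos hx]
            rw [hcast, ihm (k + 1) acc (by omega) hacc (by push_cast; omega)]
            rw [hdrop]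
            simp only [dfsBest]
            rw [if_pos hx]
          · rw [if_neg hx]
            have hrec : dfsF f pos (bishops ++ [pos[k]]) (k : Int) (PySem.Set.add R (pos[k].1 + pos[k].2))
                (PySem.Set.add L (pos[k].1 - pos[k].2))
                = (bishops.length : Int) + 1
                  + dfsBest (pos.drop (k + 1)) (PySem.Set.add R (pos[k].1 + pos[k].2)) (PySem.Set.add L (pos[k].1 - pos[k].2)) := by
              rw [ih pos (bishops ++ [pos[k]]) (k : Int) _ _ (by omega) (by omega)]
              have : ((k : Int) + 1).toNat = k + 1 := by omega
              rw [this]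
              simp only [List.length_append, List.length_cons, List.length_nil]
              push_cast; ring
            rw [hrec, hcast,
              ihm (k + 1) _ (by omega) (le_max_of_le_left hacc) (by push_cast; omega)]
            rw [hdrop]
            simp only [dfsBest]
            rw [if_neg hx, union_singleton, union_singleton]
            have hnn := dfsBest_nonneg (pos.drop (k + 1)) R L
            have hnn2 := dfsBest_nonneg (pos.drop (k + 1)) (PySem.Set.add R (pos[k].1 + pos[k].2)) (PySem.Set.add L (pos[k].1 - pos[k].2))
            omega
        · have hnil : PySem.List.pyRange (k : Int) (pos.length : Int) 1 = [] :=
            PySem.List.pyRange_one_eq_nil (by omega)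
          rw [hnil, List.drop_eq_nil_of_le (by omega)]
          simp only [List.foldl_nil, dfsBest]
          omega
    have hk0 : (level + 1) = (((level + 1).toNat : Nat) : Int) := by omega
    show (PySem.List.pyRange (level + 1) (pos.length : Int) 1).foldl _ _ = _
    rw [hk0, loop pos.length (level + 1).toNat (bishops.length : Int) (by omega) le_rfl (by omega)]
    simp only [Int.toNat_natCast]
    have := dfsBest_nonneg (pos.drop (level + 1).toNat) R L
    omega

theorem ofList_congr (cells : List (Int × Int)) (R L : List Int) :
    dfsBest cells (PySem.Set.ofList R) (PySem.Set.ofList L) = dfsBest cells R L := by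
  refine dfsBest_congr _ _ _ _ _ (fun c _ => ?_)
  constructor <;> simp [PySem.Set.mem_ofList]

-- ===== VERDICT (by name: the statement is the Claim_ definition above) =====
theorem dfs_spec : Claim_equal_dfs := by
  intro pos bishops level right left _ hpre
  unfold Pre_dfs at hpre
  unfold Spec_dfs dfs dfs_alt
  rw [dfsF_eq _ pos bishops level right left hpre (by omega)]
  rw [PySem.List.slice_from pos (by omega)]
  rw [dfsBest_split (pos.drop (level + 1).toNat) right left,
    ← ofList_congr (List.filter _ (pos.drop (level + 1).toNat)) right left,
    ← ofList_congr (List.filter _ (pos.drop (level + 1).toNat)) right left]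
  ring
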